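-- pv_equiv track=rewrite | github.com/fabien-brulport/advent-of-code | aoc-2021/code/solution_16.py | decode_literal
-- ===== SOURCE A (Python) =====
-- from typing import List, Tuple
--
-- def bits_to_int(bits: str) -> int:
--     out = 0
--     for bit in bits:
--         out = (out << 1) | int(bit)
--     return out
--
-- def decode_literal(packet: str) -> Tuple[int, int]:
--     literal = []
--     for i in range(int(len(packet) / 5)):
--         five_bits = packet[i * 5 : (i + 1) * 5]
--         literal.extend(five_bits[1:])
--         if five_bits[0] == "0":
--             return bits_to_int("".join(literal)), 5 * i
--     raise RuntimeError
-- ===== SOURCE B (Python) =====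
-- def decode_literal(packet):
--     n = int(len(packet) / 5)
--     # phase 1: scan only the leading bit of each 5-bit group to find the terminator
--     stop = -1
--     for i in range(n):
--         if packet[5 * i] == "0":
--             stop = i
--             break
--     if stop < 0:
--         raise RuntimeError
--     # phase 2: fold the payload bits of groups 0..stop directly into the value
--     value = 0
--     for i in range(stop + 1):
--         for c in packet[5 * i + 1 : 5 * i + 5]:
--             value = (value << 1) | int(c)
--     return value, 5 * stop
-- ===== Notes on version B (the rewrite author's own statement) =====
-- stated objective: alternative
-- what changed: Replaces A's single accumulate-while-scanning pass (building a char list, then joining and folding it in a helper) by a two-phase algorithm: first scan only the leading bits to locate the terminating group, then fold the payload bits of the consumed groups directly into the integer without any list building.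
import Mathlib
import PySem

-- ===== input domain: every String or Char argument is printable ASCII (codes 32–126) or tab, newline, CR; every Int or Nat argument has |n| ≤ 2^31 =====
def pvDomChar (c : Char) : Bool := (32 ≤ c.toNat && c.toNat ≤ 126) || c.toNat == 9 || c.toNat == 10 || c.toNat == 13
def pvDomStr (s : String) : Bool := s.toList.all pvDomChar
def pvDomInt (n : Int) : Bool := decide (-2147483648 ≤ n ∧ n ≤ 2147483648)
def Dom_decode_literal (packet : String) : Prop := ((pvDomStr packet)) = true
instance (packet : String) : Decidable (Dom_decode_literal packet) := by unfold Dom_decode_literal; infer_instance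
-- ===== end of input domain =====

-- B replaces A's accumulate-chars-then-fold pass by a two-phase scan (find the terminating
-- group first, then fold the payload bits directly into the value); alternative, not faster.

-- ===== PORT A =====

-- int(bit) ported as toNat - 48: exact for '0'..'9'; any other char raises ValueError in
-- Python, and such inputs are excluded by Pre_decode_literal.
def bits_to_int (bits : List Char) : Int :=
  bits.foldl (fun out bit => PySem.Int.bor (out <<< (1 : Nat)) ((bit.toNat : Int) - 48)) 0

-- the for-loop of A, with the growing `literal` accumulator; the fall-through of the range
-- (raise RuntimeError) is excluded by Pre_decode_literal and returns (0, 0) here.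
def aLoop (cs : List Char) (n i : Nat) (literal : List Char) : Int × Int :=
  if _h : i < n then
    -- packet[i*5 : (i+1)*5] : a non-negative in-range slice = drop/take (exact here)
    let five_bits := (cs.drop (i * 5)).take 5
    let literal' := literal ++ five_bits.drop 1
    if five_bits.head? = some '0' then (bits_to_int literal', 5 * i)
    else aLoop cs n (i + 1) literal'
  else (0, 0)
termination_by n - i

-- int(len(packet) / 5): float division then truncation = len / 5 on Nat (exact on Dom sizes)
def decode_literal (packet : String) : Int × Int :=
  aLoop packet.toList (packet.toList.length / 5) 0 []

-- ===== PORT B =====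

-- phase 1 of Source B: scan only the leading bit of each group; `stop = -1` + break is the Option
def findStop (cs : List Char) (n i : Nat) : Option Nat :=
  if i < n then
    if cs[5 * i]? = some '0' then some i else findStop cs n (i + 1)
  else none
termination_by n - i

-- inner for-loop of phase 2: packet[5*i+1 : 5*i+5] folded into value
def bGroup (cs : List Char) (value : Int) (i : Nat) : Int :=
  ((cs.drop (5 * i + 1)).take 4).foldl
    (fun value c => PySem.Int.bor (value <<< (1 : Nat)) ((c.toNat : Int) - 48)) value

def decode_literal_alt (packet : String) : Int × Int :=
  match findStop packet.toList (packet.toList.length / 5) 0 with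
  | none => (0, 0)  -- raise RuntimeError, excluded by Pre_decode_literal
  | some stop => ((List.range (stop + 1)).foldl (bGroup packet.toList) 0, 5 * stop)

-- ===== PRECONDITION & SPEC =====

def isDigitAt (cs : List Char) (idx : Nat) : Bool :=
  match cs[idx]? with
  | some c => decide ('0' ≤ c ∧ c ≤ '9')
  | none => false

-- Exactly the inputs on which Python's A returns: some group's leading bit is '0' (else
-- RuntimeError) and every payload char consumed up to the first such group is a decimal
-- digit (else int(bit) raises ValueError).
def Pre_decode_literal (packet : String) : Prop :=
  ∃ i < packet.toList.length / 5,
    packet.toList[5 * i]? = some '0' ∧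
    (∀ j < i, ¬ packet.toList[5 * j]? = some '0') ∧
    (∀ j ≤ i, ∀ k < 4, isDigitAt packet.toList (5 * j + 1 + k) = true)

instance (packet : String) : Decidable (Pre_decode_literal packet) := by
  unfold Pre_decode_literal; infer_instance

def pvWitness_decode_literal : String := "1101001010"

def Spec_decode_literal (packet : String) (out : Int × Int) : Prop := out = decode_literal_alt packet
instance (packet : String) (out : Int × Int) : Decidable (Spec_decode_literal packet out) := by unfold Spec_decode_literal; infer_instance

-- ===== CLAIM (what is proved, stated in full; the proofs are below) =====
def Claim_equal_decode_literal : Prop := ∀ (packet : String), Dom_decode_literal packet → Pre_decode_literal packet → Spec_decode_literal packet (decode_literal packet)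

-- ===== LEMMAS AND PROOFS =====

-- the payload chars of groups i, i+1, …, i0
def tails (cs : List Char) (i i0 : Nat) : List Char :=
  (List.range' i (i0 + 1 - i)).flatMap (fun j => (cs.drop (5 * j + 1)).take 4)

theorem findStop_eq (cs : List Char) (n i0 : Nat) (h0 : i0 < n)
    (hz : cs[5 * i0]? = some '0') (hmin : ∀ j < i0, ¬ cs[5 * j]? = some '0') :
    ∀ i, i ≤ i0 → findStop cs n i = some i0 := by
  intro i hi
  induction hd : i0 - i generalizing i with
  | zero =>
    have : i = i0 := by omega
    subst this
    unfold findStop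
    simp [h0, hz]
  | succ d ih =>
    have hlt : i < i0 := by omega
    unfold findStop
    rw [if_pos (by omega), if_neg (hmin i hlt), ih (i + 1) (by omega) (by omega)]

theorem foldl_flatMap {α β γ : Type} (f : β → α → β) (g : γ → List α) :
    ∀ (l : List γ) (b : β),
      (l.flatMap g).foldl f b = l.foldl (fun b i => (g i).foldl f b) b := by
  intro l
  induction l with
  | nil => intro b; rfl
  | cons x xs ih => intro b; simp [List.flatMap_cons, List.foldl_append, ih]

theorem aLoop_eq (cs : List Char) (n i0 : Nat) (h0 : i0 < n) (hn : 5 * n ≤ cs.length)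
    (hz : cs[5 * i0]? = some '0') (hmin : ∀ j < i0, ¬ cs[5 * j]? = some '0') :
    ∀ i, i ≤ i0 → ∀ acc,
      aLoop cs n i acc = (bits_to_int (acc ++ tails cs i i0), ((5 * i0 : Nat) : Int)) := by
  intro i hi
  induction hd : i0 - i generalizing i with
  | zero =>
    have hii : i = i0 := by omega
    subst hii
    intro acc
    unfold aLoop
    have hfive : ((cs.drop (i * 5)).take 5).head? = cs[5 * i]? := by
      rw [List.head?_take]
      simp [List.head?_drop, Nat.mul_comm]
    have htail : ((cs.drop (i * 5)).take 5).drop 1 = (cs.drop (5 * i + 1)).take 4 := by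
      rw [List.drop_take, List.drop_drop]
      norm_num [Nat.mul_comm]
    rw [dif_pos h0, if_pos (by rw [hfive]; exact hz)]
    simp [tails, htail]
  | succ d ih =>
    have hlt : i < i0 := by omega
    intro acc
    unfold aLoop
    have hfive : ((cs.drop (i * 5)).take 5).head? = cs[5 * i]? := by
      rw [List.head?_take]
      simp [List.head?_drop, Nat.mul_comm]
    have htail : ((cs.drop (i * 5)).take 5).drop 1 = (cs.drop (5 * i + 1)).take 4 := by
      rw [List.drop_take, List.drop_drop]
      norm_num [Nat.mul_comm]
    rw [dif_pos (by omega), if_neg (by rw [hfive]; exact hmin i hlt),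
      ih (i + 1) (by omega) (by omega)]
    have hsplit : tails cs i i0 = (cs.drop (5 * i + 1)).take 4 ++ tails cs (i + 1) i0 := by
      unfold tails
      rw [show i0 + 1 - (i + 1) = i0 - i from by omega,
        show i0 + 1 - i = (i0 - i) + 1 from by omega, List.range'_succ, List.flatMap_cons]
    rw [hsplit, htail, ← List.append_assoc]

theorem decode_literal_spec : Claim_equal_decode_literal := by
  intro packet _hdom hpre
  obtain ⟨i0, h0, hz, hmin, _hdig⟩ := hpre
  unfold Spec_decode_literal decode_literal decode_literal_alt
  have hn : 5 * (packet.toList.length / 5) ≤ packet.toList.length := by omega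
  rw [aLoop_eq packet.toList _ i0 h0 hn hz hmin 0 (Nat.zero_le _) [],
    findStop_eq packet.toList _ i0 h0 hz hmin 0 (Nat.zero_le _)]
  simp only [List.nil_append]
  have : (List.range (i0 + 1)).foldl (bGroup packet.toList) 0
      = bits_to_int (tails packet.toList 0 i0) := by
    rw [List.range_eq_range']
    unfold tails bGroup bits_to_int
    rw [Nat.sub_zero, foldl_flatMap]
  rw [this, Prod.mk.injEq]
  exact ⟨rfl, by push_cast; ring⟩
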